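-- pv_equiv track=rewrite | github.com/ayushnagar123/road-to-developer | cloud.py | cleaning
-- ===== SOURCE A (Python) =====
-- def cleaning(L):
--     m = L[0]
--     flag = 0
--     for n,i in enumerate(L):
--         if(i<m):
--             L[n] = m+flag
--         elif(i>m):
--             flag = 1
--             m = i
--     return L
-- ===== SOURCE B (Python) =====
-- def cleaning(L):
--     first = L[0]
--     # pass 1: table of prefix running maxima: pref[n] = max(L[0..n])
--     pref = []
--     m = first
--     for x in L:
--         if x > m:
--             m = x
--         pref.append(m)
--     # pass 2: correct each position from the table
--     for n in range(1, len(L)):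
--         prev = pref[n - 1]
--         if L[n] < prev:
--             L[n] = prev + (1 if prev > first else 0)
--     return L
-- ===== Notes on version B (the rewrite author's own statement) =====
-- stated objective: alternative
-- what changed: Replaces A's single fused running-max loop carrying a flag with two separate passes: first a precomputed prefix-maximum table, then a correction pass that derives A's flag as 'prefix max exceeds the first element'.
import Mathlib
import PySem

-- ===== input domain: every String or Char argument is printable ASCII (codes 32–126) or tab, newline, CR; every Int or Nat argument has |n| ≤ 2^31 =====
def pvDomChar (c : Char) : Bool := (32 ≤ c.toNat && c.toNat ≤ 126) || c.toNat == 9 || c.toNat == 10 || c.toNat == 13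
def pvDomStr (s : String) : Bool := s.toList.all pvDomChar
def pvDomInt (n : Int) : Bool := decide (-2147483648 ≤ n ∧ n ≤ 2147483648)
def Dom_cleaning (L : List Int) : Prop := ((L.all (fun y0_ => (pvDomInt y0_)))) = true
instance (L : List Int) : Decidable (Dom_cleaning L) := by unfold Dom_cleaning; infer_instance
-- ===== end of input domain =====

-- B replaces A's fused running-max loop (carrying a flag) by a prefix-max table plus a
-- separate correction pass; same cost, different decomposition. Both Pythons mutate L in
-- place in the same way; the equivalence proved here is about the returned value.

-- ===== PORT A =====
-- one step of A's for-loop: state (list, m, flag), p = (n, i) from enumerating the list.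
-- (Python iterates over the list while assigning into it; since only the current index is overwritten,
-- the values read are the original ones, which is what folding over enumerate L gives.)
def cleaningStep (st : List Int × Int × Int) (p : Int × Int) : List Int × Int × Int :=
  if p.2 < st.2.1 then (PySem.List.pySetD st.1 p.1 (st.2.1 + st.2.2), st.2.1, st.2.2)
  else if p.2 > st.2.1 then (st.1, p.2, 1)
  else st

def cleaning (L : List Int) : List Int :=
  match L with
  | [] => []  -- Python raises IndexError reading the first element; excluded by Pre_cleaning
  | m0 :: _ =>
    ((PySem.List.enumerate L 0).foldl cleaningStep (L, m0, 0)).1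

-- ===== PORT B =====
-- pass 1 step: append the running maximum
def prefStep (st : List Int × Int) (x : Int) : List Int × Int :=
  let m := if x > st.2 then x else st.2
  (st.1 ++ [m], m)

-- pass 2 step: correct position n from the table (indices n-1, n are in range)
def fixStep (pref : List Int) (first : Int) (acc : List Int) (n : Int) : List Int :=
  let prev := PySem.List.pyGetD pref (n - 1) 0
  if PySem.List.pyGetD acc n 0 < prev then
    PySem.List.pySetD acc n (prev + (if prev > first then 1 else 0))
  else acc

def cleaning_alt (L : List Int) : List Int :=
  match L with
  | [] => []  -- Python raises IndexError reading the first element; excluded by Pre_cleaning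
  | first :: _ =>
    let pref := (L.foldl prefStep ([], first)).1
    (PySem.List.pyRange 1 (L.length : Int) 1).foldl (fixStep pref first) L

-- ===== PRECONDITION & SPEC =====
-- Pre_ excludes only the empty list, on which Python A raises IndexError reading the first element.
def Pre_cleaning (L : List Int) : Prop := L ≠ []
instance (L : List Int) : Decidable (Pre_cleaning L) := by unfold Pre_cleaning; infer_instance
def pvWitness_cleaning : List Int := [3, 1, 2]

def Spec_cleaning (L : List Int) (out : List Int) : Prop := out = cleaning_alt L
instance (L : List Int) (out : List Int) : Decidable (Spec_cleaning L out) := by unfold Spec_cleaning; infer_instance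

-- ===== CLAIM (what is proved, stated in full; the proofs are below) =====
def Claim_equal_cleaning : Prop := ∀ (L : List Int), Dom_cleaning L → Pre_cleaning L → Spec_cleaning L (cleaning L)

-- ===== LEMMAS AND PROOFS =====

-- common specification: structural recursion over the suffix, state (m, flag)
def go (m flag : Int) : List Int → List Int
  | [] => []
  | x :: xs =>
    if x < m then (m + flag) :: go m flag xs
    else if x > m then x :: go x 1 xs
    else x :: go m flag xs

-- prefix running maxima starting from m
def prefMax (m : Int) : List Int → List Int
  | [] => []
  | x :: xs => (if x > m then x else m) :: prefMax (if x > m then x else m) xs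

lemma pref_fold : ∀ (xs acc : List Int) (m : Int),
    (xs.foldl prefStep (acc, m)).1 = acc ++ prefMax m xs := by
  intro xs
  induction xs with
  | nil => intro acc m; simp [prefMax]
  | cons x xs ih =>
    intro acc m
    simp only [List.foldl_cons, prefStep, prefMax]
    rw [ih]
    simp

lemma A_loop : ∀ (suf tpre : List Int) (m flag : Int),
    ((PySem.List.enumerate suf (tpre.length : Int)).foldl cleaningStep (tpre ++ suf, m, flag)).1
      = tpre ++ go m flag suf := by
  intro suf
  induction suf with
  | nil => intro tpre m flag; simp [PySem.List.enumerate_nil, go]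
  | cons x xs ih =>
    intro tpre m flag
    rw [PySem.List.enumerate_cons]
    simp only [List.foldl_cons, cleaningStep, go]
    by_cases h1 : x < m
    · simp only [h1, if_pos]
      have hset : PySem.List.pySetD (tpre ++ x :: xs) (tpre.length : Int) (m + flag)
          = (tpre ++ [m + flag]) ++ xs := by
        rw [PySem.List.pySetD_natCast]
        rw [List.set_append_right _ _ (Nat.le_refl _)]
        simp
      rw [hset]
      have := ih (tpre ++ [m + flag]) m flag
      simp only [List.length_append, List.length_cons, List.length_nil] at this ⊢
      rw [show ((tpre.length : Int) + 1) = ((tpre.length + 1 : Nat) : Int) by push_cast; ring]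
      rw [this]
      simp
    · simp only [h1, if_neg, if_false]
      by_cases h2 : x > m
      · simp only [h2, if_pos]
        have := ih (tpre ++ [x]) x 1
        simp only [List.length_append, List.length_cons, List.length_nil] at this
        rw [show ((tpre.length : Int) + 1) = ((tpre.length + 1 : Nat) : Int) by push_cast; ring]
        rw [show tpre ++ x :: xs = (tpre ++ [x]) ++ xs by simp, this]
        simp [h1, h2]
      · simp only [h2, if_neg, if_false]
        have := ih (tpre ++ [x]) m flag
        simp only [List.length_append, List.length_cons, List.length_nil] at this
        rw [show ((tpre.length : Int) + 1) = ((tpre.length + 1 : Nat) : Int) by push_cast; ring]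
        rw [show tpre ++ x :: xs = (tpre ++ [x]) ++ xs by simp, this]
        simp [h1, h2]

lemma B_loop : ∀ (suf tpre ppre : List Int) (m first : Int)
    (hne : ppre ≠ []) (hlen : tpre.length = ppre.length)
    (hlast : ppre.getLast hne = m) (hge : first ≤ m),
    (PySem.List.pyRange (ppre.length : Int) ((ppre.length : Int) + (suf.length : Int)) 1).foldl
        (fixStep (ppre ++ prefMax m suf) first) (tpre ++ suf)
      = tpre ++ go m (if m > first then 1 else 0) suf := by
  intro suf
  induction suf with
  | nil =>
    intro tpre ppre m first hne hlen hlast hge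
    rw [PySem.List.pyRange_one_eq_nil (by simp)]
    simp [go]
  | cons x xs ih =>
    intro tpre ppre m first hne hlen hlast hge
    have hlt : (ppre.length : Int) < (ppre.length : Int) + ((x :: xs).length : Int) := by
      simp only [List.length_cons]; push_cast; omega
    rw [PySem.List.pyRange_one_cons hlt]
    simp only [List.foldl_cons]
    have hppne : 0 < ppre.length := List.length_pos_of_ne_nil hne
    -- the table entry read at this step is the last element of ppre, i.e. m
    have hprev : PySem.List.pyGetD (ppre ++ prefMax m (x :: xs)) ((ppre.length : Int) - 1) 0 = m := by
      rw [show ((ppre.length : Int) - 1) = ((ppre.length - 1 : Nat) : Int) by omega]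
      rw [PySem.List.pyGetD_natCast]
      rw [List.getD_eq_getElem _ _ (by simp [prefMax]; omega)]
      rw [List.getElem_append_left (by omega)]
      rw [← List.getLast_eq_getElem hne]
      exact hlast
    -- the current element read is x
    have hcur : PySem.List.pyGetD (tpre ++ x :: xs) ((ppre.length : Int)) 0 = x := by
      rw [PySem.List.pyGetD_natCast, ← hlen]
      rw [List.getD_eq_getElem _ _ (by simp)]
      simp
    have hlenS : ((ppre.length : Int) + ((x :: xs).length : Int))
        = ((ppre.length + 1 : Nat) : Int) + (xs.length : Int) := by
      simp only [List.length_cons]; push_cast; ring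
    rcases lt_trichotomy x m with h | h | h
    · -- x < m : position gets corrected, running max stays m
      have hmite : (if x > m then x else m) = m := if_neg (by omega)
      have hshape : prefMax m (x :: xs) = m :: prefMax m xs := by
        rw [prefMax, hmite]
      have hstep : fixStep (ppre ++ prefMax m (x :: xs)) first (tpre ++ x :: xs) (ppre.length : Int)
          = (tpre ++ [m + (if m > first then 1 else 0)]) ++ xs := by
        simp only [fixStep, hprev, hcur]
        rw [if_pos h, PySem.List.pySetD_natCast, ← hlen]
        rw [List.set_append_right _ _ (Nat.le_refl _)]
        simp
      rw [hstep, hshape]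
      rw [show ppre ++ m :: prefMax m xs = (ppre ++ [m]) ++ prefMax m xs by simp]
      have := ih (tpre ++ [m + (if m > first then 1 else 0)]) (ppre ++ [m]) m first
        (by simp) (by simp [hlen]) (by simp) hge
      rw [show ((ppre.length : Int) + 1) = ((ppre.length + 1 : Nat) : Int) by push_cast; ring]
      rw [hlenS, show (ppre.length + 1 : Nat) = (ppre ++ [m]).length by simp, this]
      simp [go, h]
    · -- x = m : nothing changes
      have hmite : (if x > m then x else m) = m := if_neg (by omega)
      have hshape : prefMax m (x :: xs) = m :: prefMax m xs := by
        rw [prefMax, hmite]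
      have hstep : fixStep (ppre ++ prefMax m (x :: xs)) first (tpre ++ x :: xs) (ppre.length : Int)
          = (tpre ++ [x]) ++ xs := by
        simp only [fixStep, hprev, hcur]
        rw [if_neg (by omega)]
        simp
      rw [hstep, hshape]
      rw [show ppre ++ m :: prefMax m xs = (ppre ++ [m]) ++ prefMax m xs by simp]
      have := ih (tpre ++ [x]) (ppre ++ [m]) m first
        (by simp) (by simp [hlen]) (by simp) hge
      rw [show ((ppre.length : Int) + 1) = ((ppre.length + 1 : Nat) : Int) by push_cast; ring]
      rw [hlenS, show (ppre.length + 1 : Nat) = (ppre ++ [m]).length by simp, this]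
      simp [go, h]
    · -- m < x : running max advances to x, and from now on the flag is 1
      have hmite : (if x > m then x else m) = x := if_pos (by omega)
      have hshape : prefMax m (x :: xs) = x :: prefMax x xs := by
        rw [prefMax, hmite]
      have hstep : fixStep (ppre ++ prefMax m (x :: xs)) first (tpre ++ x :: xs) (ppre.length : Int)
          = (tpre ++ [x]) ++ xs := by
        simp only [fixStep, hprev, hcur]
        rw [if_neg (by omega)]
        simp
      rw [hstep, hshape]
      rw [show ppre ++ x :: prefMax x xs = (ppre ++ [x]) ++ prefMax x xs by simp]
      have := ih (tpre ++ [x]) (ppre ++ [x]) x first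
        (by simp) (by simp [hlen]) (by simp) (by omega)
      rw [show ((ppre.length : Int) + 1) = ((ppre.length + 1 : Nat) : Int) by push_cast; ring]
      rw [hlenS, show (ppre.length + 1 : Nat) = (ppre ++ [x]).length by simp, this]
      have hxf : first < x := by omega
      simp [go, h, hxf, show ¬ x < m by omega]

lemma cleaning_eq_go (first : Int) (rest : List Int) :
    cleaning (first :: rest) = first :: go first 0 rest := by
  unfold cleaning
  rw [PySem.List.enumerate_cons]
  simp only [List.foldl_cons, cleaningStep]
  simp only [lt_irrefl, gt_iff_lt, if_neg, if_false]
  have := A_loop rest [first] first 0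
  simpa using this

lemma cleaning_alt_eq_go (first : Int) (rest : List Int) :
    cleaning_alt (first :: rest) = first :: go first 0 rest := by
  unfold cleaning_alt
  simp only
  have hpref : ((first :: rest).foldl prefStep ([], first)).1
      = [first] ++ prefMax first rest := by
    simp only [List.foldl_cons, prefStep, lt_irrefl, gt_iff_lt, if_false]
    have := pref_fold rest [first] first
    simpa using this
  rw [hpref]
  have := B_loop rest [first] [first] first first (by simp) (by simp) (by simp) (le_refl _)
  simp only [List.length_cons, List.length_nil, Nat.zero_add, Nat.cast_one,
    List.singleton_append, lt_irrefl, gt_iff_lt, if_false] at this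
  have hlen : ((first :: rest).length : Int) = 1 + (rest.length : Int) := by push_cast; simp; ring
  rw [hlen]
  exact this

-- ===== VERDICT (by name: the statement is the Claim_ definition above) =====
theorem cleaning_spec : Claim_equal_cleaning := by
  intro L _ hpre
  unfold Spec_cleaning
  match L with
  | [] => exact absurd rfl hpre
  | first :: rest => rw [cleaning_eq_go, cleaning_alt_eq_go]
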